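-- pv_equiv track=rewrite | github.com/kspandan/Projects | maes/bit.py | inv_single_bit_permutation
-- ===== SOURCE A (Python) =====
-- def int_to_8bit(a):
--     bnr = bin(a).replace('0b', '')
--     x = bnr[::-1]  # this reverses an array
--     while len(x) < 8:
--         x += '0'
--     bnr = x[::-1]
--     return bnr
--
-- def add2(a):
--     decimal = 0
--     for digit in a:
--         decimal = decimal * 2 + int(digit)
--     return decimal
--
-- def listToInt(integers):
--     strings = [str(integer) for integer in integers]
--     a_string = "".join(strings)
--     an_integer = int(a_string)
--     return an_integer
--
-- def chunks(l, n):
--     final = [l[i * n:(i + 1) * n] for i in range((len(l) + n - 1) // n)]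
--     return final
--
-- def inv_single_bit_permutation(a):
--     rows = []
--     for i in range(4):
--         a_list = [int(x) for x in str(int_to_8bit(a[i]))]
--         rows.append(a_list)
--     list = []
--     for i in range(4):
--         for k in range(4):
--             list.append(rows[k][i])
--             list.append(rows[k][(i + 4) % 8])
--
--     k = chunks(list, 8)
--     for i in range(4):
--         a = listToInt(k[i])
--         k[i] = add2(str(a))
--     return(k)
-- ===== SOURCE B (Python) =====
-- def int_to_8bit(a):
--     bnr = bin(a).replace('0b', '')
--     x = bnr[::-1]  # this reverses an array
--     while len(x) < 8:
--         x += '0'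
--     bnr = x[::-1]
--     return bnr
--
-- def inv_single_bit_permutation(a):
--     # same string-based bit extraction as the original module helper
--     rows = [[int(x) for x in str(int_to_8bit(a[i]))] for i in range(4)]
--     out = []
--     for i in range(4):
--         v = 0
--         for k in range(4):
--             for j in range(2):
--                 v = (v << 1) | rows[k][i + 4 * j]
--         out.append(v)
--     return out
-- ===== Notes on version B (the rewrite author's own statement) =====
-- stated objective: simpler
-- what changed: B keeps the same string-based per-byte bit extraction but replaces A's 32-element flatten list, chunks() slicing, listToInt join-and-reparse and the decimal-string-as-binary add2() pass by computing each output byte directly with a single shift-and-or accumulation over the eight selected bits.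
import Mathlib
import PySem

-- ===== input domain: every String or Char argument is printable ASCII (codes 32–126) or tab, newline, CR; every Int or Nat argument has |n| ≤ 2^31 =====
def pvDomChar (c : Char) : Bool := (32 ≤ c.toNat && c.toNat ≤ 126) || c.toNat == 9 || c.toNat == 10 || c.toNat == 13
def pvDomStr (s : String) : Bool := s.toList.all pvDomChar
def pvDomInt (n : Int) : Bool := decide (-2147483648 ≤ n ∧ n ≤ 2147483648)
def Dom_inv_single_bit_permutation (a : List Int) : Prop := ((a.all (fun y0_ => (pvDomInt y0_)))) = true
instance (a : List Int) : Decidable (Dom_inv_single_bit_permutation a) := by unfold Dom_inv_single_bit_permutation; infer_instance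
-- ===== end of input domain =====

-- B replaces A's flatten/chunks/listToInt/decimal-string-reparse pipeline by a direct
-- shift-and-or accumulation of each output byte (same string-based bit extraction): simpler.

-- ===== PORT A =====
-- while len(x) < 8: x += '0'
def pad8 (x : List Char) : List Char :=
  if x.length < 8 then pad8 (x ++ ['0']) else x
termination_by 8 - x.length
decreasing_by simp; omega

-- int_to_8bit: bin(a).replace('0b','') is PySem.Int.toBinChars; s[::-1] is List.reverse
-- (PySem.Chars.slice?_none_none_neg_one); str() on the result is the identity.
def int_to_8bit (a : Int) : List Char :=
  let bnr := PySem.Int.toBinChars a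
  let x := bnr.reverse
  let x := pad8 x
  x.reverse

-- int(x) for a single character x; total via getD 0 (exact wherever Python's int() returns)
def charInt (c : Char) : Int := (PySem.Int.ofChars? [c]).getD 0

-- [int(x) for x in str(int_to_8bit(n))] — identical row construction in A and in B (Source B)
def rowOf (n : Int) : List Int := (int_to_8bit n).map charInt

def add2 (a : List Char) : Int := a.foldl (fun d c => d * 2 + charInt c) 0

def listToInt (integers : List Int) : Int :=
  (PySem.Int.ofChars? (PySem.Chars.join [] (integers.map PySem.Int.toChars))).getD 0

def chunksA (l : List Int) (n : Int) : List (List Int) :=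
  (PySem.List.pyRange 0 (PySem.Int.floordiv (PySem.List.len l + n - 1) n) 1).map
    (fun i => PySem.List.slice l (some (i * n)) (some ((i + 1) * n)))

-- final Python loop overwrites k[i] (read once before written, len k = 4): rendered as a map
def inv_single_bit_permutation (a : List Int) : List Int :=
  let rows : List (List Int) :=
    (PySem.List.pyRange 0 4 1).foldl
      (fun acc i => acc ++ [rowOf ((PySem.List.pyGet? a i).getD 0)]) []
  let lst : List Int :=
    (PySem.List.pyRange 0 4 1).foldl (fun acc i =>
      (PySem.List.pyRange 0 4 1).foldl (fun acc k =>
        acc ++ [PySem.List.pyGetD (PySem.List.pyGetD rows k []) i 0]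
            ++ [PySem.List.pyGetD (PySem.List.pyGetD rows k []) (PySem.Int.mod (i + 4) 8) 0]) acc) []
  let ks := chunksA lst 8
  (PySem.List.pyRange 0 4 1).map (fun i =>
    add2 (PySem.Int.toChars (listToInt (PySem.List.pyGetD ks i []))))

-- ===== PORT B =====
def inv_single_bit_permutation_alt (a : List Int) : List Int :=
  let rows : List (List Int) :=
    (PySem.List.pyRange 0 4 1).map (fun i => rowOf ((PySem.List.pyGet? a i).getD 0))
  (PySem.List.pyRange 0 4 1).foldl (fun out i =>
    out ++ [(PySem.List.pyRange 0 4 1).foldl (fun v k =>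
      (PySem.List.pyRange 0 2 1).foldl (fun v j =>
        PySem.Int.bor (v <<< (1 : Nat))
          (PySem.List.pyGetD (PySem.List.pyGetD rows k []) (i + 4 * j) 0)) v) 0]) []

-- ===== PRECONDITION & SPEC =====
-- Pre_ excludes exactly the inputs where A raises: lists shorter than 4 (IndexError on a[i])
-- and lists whose first four entries include a negative (int('-') raises ValueError).
def Pre_inv_single_bit_permutation (a : List Int) : Prop :=
  4 ≤ a.length ∧ ∀ x ∈ a.take 4, 0 ≤ x
instance (a : List Int) : Decidable (Pre_inv_single_bit_permutation a) := by
  unfold Pre_inv_single_bit_permutation; infer_instance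
def pvWitness_inv_single_bit_permutation : List Int := [1, 2, 3, 4]

def Spec_inv_single_bit_permutation (a : List Int) (out : List Int) : Prop := out = inv_single_bit_permutation_alt a
instance (a : List Int) (out : List Int) : Decidable (Spec_inv_single_bit_permutation a out) := by unfold Spec_inv_single_bit_permutation; infer_instance

-- ===== CLAIM (what is proved, stated in full; the proofs are below) =====
def Claim_equal_inv_single_bit_permutation : Prop := ∀ (a : List Int), Dom_inv_single_bit_permutation a → Pre_inv_single_bit_permutation a → Spec_inv_single_bit_permutation a (inv_single_bit_permutation a)

-- ===== LEMMAS AND PROOFS =====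

lemma toDigitsCore_two_mem (fuel : Nat) : ∀ (n : Nat) (acc : List Char),
    (∀ c ∈ acc, c = '0' ∨ c = '1') → ∀ c ∈ Nat.toDigitsCore 2 fuel n acc, c = '0' ∨ c = '1' := by
  induction fuel with
  | zero => intro n acc h; simpa [Nat.toDigitsCore] using h
  | succ f ih =>
    intro n acc h c hc
    have hd : Nat.digitChar (n % 2) = '0' ∨ Nat.digitChar (n % 2) = '1' := by
      rcases Nat.mod_two_eq_zero_or_one n with h2 | h2 <;> simp [h2, Nat.digitChar]
    rw [Nat.toDigitsCore] at hc
    by_cases h0 : n / 2 = 0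
    · simp [h0] at hc
      rcases hc with hc | hc
      · subst hc; exact hd
      · exact h c hc
    · simp [h0] at hc
      exact ih (n / 2) _ (by
        intro d hd'
        rcases List.mem_cons.mp hd' with h' | h'
        · subst h'; exact hd
        · exact h d h') c hc

lemma pad8_forall {P : Char → Prop} (x : List Char) (hx : ∀ c ∈ x, P c) (h0 : P '0') :
    ∀ c ∈ pad8 x, P c := by
  fun_induction pad8 x with
  | case1 x hlt ih =>
    exact ih (by intro c hc; rcases List.mem_append.mp hc with h | h
                 · exact hx c h
                 · simp at h; subst h; exact h0)
  | case2 x hlt => exact hx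

lemma pad8_len (x : List Char) : 8 ≤ (pad8 x).length := by
  fun_induction pad8 x with
  | case1 x hlt ih => exact ih
  | case2 x hlt => omega

lemma rowOf_mem {n : Int} (hn : 0 ≤ n) : ∀ x ∈ rowOf n, x = 0 ∨ x = 1 := by
  intro x hx
  simp only [rowOf, List.mem_map] at hx
  obtain ⟨c, hc, rfl⟩ := hx
  have hc01 : c = '0' ∨ c = '1' := by
    simp only [int_to_8bit, List.mem_reverse] at hc
    refine pad8_forall (P := fun c => c = '0' ∨ c = '1') _ ?_ (Or.inl rfl) c hc
    intro d hd
    rw [List.mem_reverse] at hd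
    have : ¬ n < 0 := not_lt.mpr hn
    simp only [PySem.Int.toBinChars, this, if_false] at hd
    exact toDigitsCore_two_mem _ _ _ (by simp) d hd
  rcases hc01 with rfl | rfl
  · left; decide
  · right; decide

lemma rowOf_len (n : Int) : 8 ≤ (rowOf n).length := by
  simp only [rowOf, int_to_8bit, List.length_map, List.length_reverse]
  exact pad8_len _

lemma getD_row01 {r : List Int} (h01 : ∀ x ∈ r, x = 0 ∨ x = 1) (hl : 8 ≤ r.length)
    {i : Int} (h0 : 0 ≤ i) (h8 : i < 8) :
    PySem.List.pyGetD r i 0 = 0 ∨ PySem.List.pyGetD r i 0 = 1 := by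
  apply h01
  exact PySem.List.pyGetD_mem r 0 ⟨by omega, by omega⟩

lemma chunk_eq (x0 x1 x2 x3 x4 x5 x6 x7 : Int)
    (h0 : x0 = 0 ∨ x0 = 1) (h1 : x1 = 0 ∨ x1 = 1) (h2 : x2 = 0 ∨ x2 = 1)
    (h3 : x3 = 0 ∨ x3 = 1) (h4 : x4 = 0 ∨ x4 = 1) (h5 : x5 = 0 ∨ x5 = 1)
    (h6 : x6 = 0 ∨ x6 = 1) (h7 : x7 = 0 ∨ x7 = 1) :
    add2 (PySem.Int.toChars (listToInt [x0, x1, x2, x3, x4, x5, x6, x7])) =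
      PySem.Int.bor (PySem.Int.bor (PySem.Int.bor (PySem.Int.bor (PySem.Int.bor
        (PySem.Int.bor (PySem.Int.bor (PySem.Int.bor ((0 : Int) <<< (1 : Nat)) x0 <<< (1 : Nat)) x1
          <<< (1 : Nat)) x2 <<< (1 : Nat)) x3 <<< (1 : Nat)) x4 <<< (1 : Nat)) x5 <<< (1 : Nat)) x6
          <<< (1 : Nat)) x7 := by
  rcases h0 with rfl | rfl <;> rcases h1 with rfl | rfl <;> rcases h2 with rfl | rfl <;>
    rcases h3 with rfl | rfl <;> rcases h4 with rfl | rfl <;> rcases h5 with rfl | rfl <;>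
    rcases h6 with rfl | rfl <;> rcases h7 with rfl | rfl <;> decide

lemma chunksA_32 (y0 y1 y2 y3 y4 y5 y6 y7 y8 y9 y10 y11 y12 y13 y14 y15 y16 y17 y18 y19 y20 y21 y22 y23 y24 y25 y26 y27 y28 y29 y30 y31 : Int) :
    chunksA [y0,y1,y2,y3,y4,y5,y6,y7,y8,y9,y10,y11,y12,y13,y14,y15,y16,y17,y18,y19,y20,y21,y22,y23,y24,y25,y26,y27,y28,y29,y30,y31] 8 =
      [[y0,y1,y2,y3,y4,y5,y6,y7],[y8,y9,y10,y11,y12,y13,y14,y15],[y16,y17,y18,y19,y20,y21,y22,y23],[y24,y25,y26,y27,y28,y29,y30,y31]] := by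
  unfold chunksA
  norm_num [PySem.List.len_eq]
  rw [show PySem.List.pyRange 0 4 1 = [0,1,2,3] from by decide]
  rfl

-- ===== VERDICT (by name: the statement is the Claim_ definition above) =====
theorem inv_single_bit_permutation_spec : Claim_equal_inv_single_bit_permutation := by
  intro a _ hpre
  obtain ⟨hlen, hpos⟩ := hpre
  unfold Spec_inv_single_bit_permutation
  match a, hlen with
  | a0 :: a1 :: a2 :: a3 :: rest, _ =>
    have h0 : 0 ≤ a0 := hpos a0 (by simp)
    have h1 : 0 ≤ a1 := hpos a1 (by simp)
    have h2 : 0 ≤ a2 := hpos a2 (by simp)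
    have h3 : 0 ≤ a3 := hpos a3 (by simp)
    have hr4 : PySem.List.pyRange 0 4 1 = [0,1,2,3] := by decide
    have hr2 : PySem.List.pyRange 0 2 1 = [0,1] := by decide
    simp only [inv_single_bit_permutation, inv_single_bit_permutation_alt,
      hr4, hr2, List.foldl, List.map]
    rw [show PySem.List.pyGet? (a0::a1::a2::a3::rest) (0:Int) = some a0 from by
          simp [PySem.List.pyGet?_of_nonneg],
        show PySem.List.pyGet? (a0::a1::a2::a3::rest) (1:Int) = some a1 from by
          simp [PySem.List.pyGet?_of_nonneg],
        show PySem.List.pyGet? (a0::a1::a2::a3::rest) (2:Int) = some a2 from by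
          simp [PySem.List.pyGet?_of_nonneg],
        show PySem.List.pyGet? (a0::a1::a2::a3::rest) (3:Int) = some a3 from by
          simp [PySem.List.pyGet?_of_nonneg]]
    simp only [Option.getD_some, List.nil_append, List.cons_append,
      show ∀ (r0 r1 r2 r3 : List Int), PySem.List.pyGetD [r0,r1,r2,r3] (0:Int) [] = r0 from fun _ _ _ _ => rfl,
      show ∀ (r0 r1 r2 r3 : List Int), PySem.List.pyGetD [r0,r1,r2,r3] (1:Int) [] = r1 from fun _ _ _ _ => rfl,
      show ∀ (r0 r1 r2 r3 : List Int), PySem.List.pyGetD [r0,r1,r2,r3] (2:Int) [] = r2 from fun _ _ _ _ => rfl,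
      show ∀ (r0 r1 r2 r3 : List Int), PySem.List.pyGetD [r0,r1,r2,r3] (3:Int) [] = r3 from fun _ _ _ _ => rfl,
      show PySem.Int.mod (0+4) 8 = 4 from rfl, show PySem.Int.mod (1+4) 8 = 5 from rfl,
      show PySem.Int.mod (2+4) 8 = 6 from rfl, show PySem.Int.mod (3+4) 8 = 7 from rfl,
      show ((0:Int)+4*0) = 0 from rfl, show ((0:Int)+4*1) = 4 from rfl,
      show ((1:Int)+4*0) = 1 from rfl, show ((1:Int)+4*1) = 5 from rfl,
      show ((2:Int)+4*0) = 2 from rfl, show ((2:Int)+4*1) = 6 from rfl,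
      show ((3:Int)+4*0) = 3 from rfl, show ((3:Int)+4*1) = 7 from rfl,
      chunksA_32]
    have H : ∀ (n : Int), 0 ≤ n → ∀ i : Int, 0 ≤ i → i < 8 →
        PySem.List.pyGetD (rowOf n) i 0 = 0 ∨ PySem.List.pyGetD (rowOf n) i 0 = 1 :=
      fun n hn i hi hi8 => getD_row01 (rowOf_mem hn) (rowOf_len n) hi hi8
    simp only [List.cons.injEq, and_true]
    refine ⟨?_, ?_, ?_, ?_⟩ <;>
      exact chunk_eq _ _ _ _ _ _ _ _
        (H a0 h0 _ (by norm_num) (by norm_num)) (H a0 h0 _ (by norm_num) (by norm_num))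
        (H a1 h1 _ (by norm_num) (by norm_num)) (H a1 h1 _ (by norm_num) (by norm_num))
        (H a2 h2 _ (by norm_num) (by norm_num)) (H a2 h2 _ (by norm_num) (by norm_num))
        (H a3 h3 _ (by norm_num) (by norm_num)) (H a3 h3 _ (by norm_num) (by norm_num))
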